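-- pv_equiv track=rewrite | github.com/tdat5415/Python | py/temp/_피쳐추출/피처추출기/extraction.py | n_gram_list
-- ===== SOURCE A (Python) =====
-- def n_gram_list(text, n): # 'text' -> [('t','e'), ('e','x'), ('x','t')]
--     ng_list = []
--
--     text_list = []
--     for i in range(n):
--         text_list.append(text[i:])
--
--     n_gram_zip =zip(*text_list)
--     for i in n_gram_zip:
--         ng_list.append(i)
--
--     return ng_list
-- ===== SOURCE B (Python) =====
-- def n_gram_list(text, n):
--     # Index-based sliding window instead of transposing n shifted slices.
--     if n <= 0:
--         return []
--     return [tuple(text[i:i+n]) for i in range(len(text) - n + 1)]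
-- ===== Notes on version B (the rewrite author's own statement) =====
-- stated objective: simpler
-- what changed: Replaces A's build-n-shifted-slices-then-zip(*) transpose with a direct sliding-window scan emitting tuple(text[i:i+n]) for each valid start position.
import Mathlib
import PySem

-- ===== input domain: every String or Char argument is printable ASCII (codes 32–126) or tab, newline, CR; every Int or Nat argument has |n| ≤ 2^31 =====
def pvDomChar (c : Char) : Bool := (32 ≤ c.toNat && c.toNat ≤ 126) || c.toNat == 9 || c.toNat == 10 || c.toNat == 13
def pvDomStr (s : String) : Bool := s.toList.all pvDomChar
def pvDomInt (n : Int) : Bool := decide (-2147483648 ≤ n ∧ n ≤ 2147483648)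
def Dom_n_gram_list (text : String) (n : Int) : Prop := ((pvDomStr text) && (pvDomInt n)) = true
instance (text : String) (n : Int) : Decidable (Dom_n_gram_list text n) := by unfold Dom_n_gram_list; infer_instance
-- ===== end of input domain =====

-- B replaces A's zip(*) transpose of n shifted slices by a direct sliding-window scan (simpler decomposition, same cost).

-- ===== PORT A =====
-- zip(*text_list) over lists of chars: stops at the shortest list; zip() of no lists is empty.
-- Fuel = length of the first list: the loop tails every list each step, so after that many
-- steps the first list is empty and the emptiness guard would stop anyway (go 0 _ = [] agrees).
def pyZipStarGo : Nat → List (List Char) → List (List Char)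
  | 0, _ => []
  | fuel + 1, ls =>
    if ls.any (fun l => l.isEmpty) then []
    else (ls.map (fun l => l.headD ' ')) :: pyZipStarGo fuel (ls.map List.tail)

def pyZipStar (ls : List (List Char)) : List (List Char) :=
  match ls with
  | [] => []
  | l :: rest => pyZipStarGo l.length (l :: rest)

-- Python's 1-char strings (tuple components) become String.singleton of the char.
def n_gram_list (text : String) (n : Int) : List (List String) :=
  let cs := text.toList
  let text_list := (PySem.List.pyRange 0 n 1).foldl
    (fun acc i => acc ++ [PySem.List.slice cs (some i) none]) []
  let zipped := pyZipStar text_list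
  zipped.foldl (fun acc t => acc ++ [t.map (fun c => String.singleton c)]) []

-- ===== PORT B =====
def n_gram_list_alt (text : String) (n : Int) : List (List String) :=
  if n ≤ 0 then []
  else
    let cs := text.toList
    let k := n.toNat
    (List.range (cs.length + 1 - k)).map
      (fun i => ((cs.drop i).take k).map (fun c => String.singleton c))

-- ===== PRECONDITION & SPEC =====
def Spec_n_gram_list (text : String) (n : Int) (out : List (List String)) : Prop := out = n_gram_list_alt text n
instance (text : String) (n : Int) (out : List (List String)) : Decidable (Spec_n_gram_list text n out) := by unfold Spec_n_gram_list; infer_instance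

-- ===== CLAIM (what is proved, stated in full; the proofs are below) =====
def Claim_equal_n_gram_list : Prop := ∀ (text : String) (n : Int), Dom_n_gram_list text n → Spec_n_gram_list text n (n_gram_list text n)

-- ===== LEMMAS AND PROOFS =====

lemma foldl_push {α β : Type} (f : α → β) :
    ∀ (l : List α) (acc : List β), l.foldl (fun acc i => acc ++ [f i]) acc = acc ++ l.map f := by
  intro l
  induction l with
  | nil => simp
  | cons x xs ih => intro acc; simp [List.foldl, ih]

lemma heads_take (xs : List Char) (m : Nat) (h : m ≤ xs.length) :
    (List.range m).map (fun i => (xs.drop i).headD ' ') = xs.take m := by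
  apply List.ext_getElem
  · simp [h]
  · intro i h1 h2
    have hi : i < xs.length := lt_of_lt_of_le (by simpa using h1) h
    have hne : xs.drop i ≠ [] := by
      simp [List.drop_eq_nil_iff]; omega
    simp only [List.getElem_map, List.getElem_range, List.getElem_take]
    rw [List.headD_eq_head?, List.head?_drop]
    simp [List.getElem?_eq_getElem hi]

lemma zip_windows : ∀ (cs : List Char) (m : Nat), 1 ≤ m →
    pyZipStarGo cs.length ((List.range m).map (fun i => cs.drop i)) =
      (List.range (cs.length + 1 - m)).map (fun i => (cs.drop i).take m) := by
  intro cs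
  induction cs with
  | nil =>
    intro m hm
    have : 1 - m = 0 := by omega
    simp [pyZipStarGo, this]
  | cons c cs' ih =>
    intro m hm
    by_cases hbig : cs'.length + 2 ≤ m
    · -- some slice is empty: zip stops immediately; window range is empty too
      have hany : ((List.range m).map (fun i => (c :: cs').drop i)).any (fun l => l.isEmpty) = true := by
        simp only [List.any_map, List.any_eq_true]
        refine ⟨cs'.length + 1, by simp; omega, ?_⟩
        simp [List.drop_eq_nil_iff]
      have hK : cs'.length + 1 + 1 - m = 0 := by omega
      simp only [List.length_cons, pyZipStarGo, hany, if_true, hK, List.range_zero, List.map_nil]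
    · -- every slice nonempty: peel one row and recurse
      have hmle : m ≤ cs'.length + 1 := by omega
      have hany : ((List.range m).map (fun i => (c :: cs').drop i)).any (fun l => l.isEmpty) = false := by
        simp only [List.any_map, List.any_eq_false]
        intro i hi
        simp only [List.mem_range] at hi
        simp
        omega
      have htails : ((List.range m).map (fun i => (c :: cs').drop i)).map List.tail
          = (List.range m).map (fun i => cs'.drop i) := by
        simp only [List.map_map]
        apply List.map_congr_left
        intro i _
        simp [List.tail_drop, List.drop_succ_cons]
      have hheads : ((List.range m).map (fun i => (c :: cs').drop i)).map (fun l => l.headD ' ')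
          = (c :: cs').take m := by
        rw [List.map_map]
        exact heads_take (c :: cs') m (by simpa using hmle)
      have hK : cs'.length + 1 + 1 - m = (cs'.length + 1 - m) + 1 := by omega
      simp only [List.length_cons, pyZipStarGo, hany, if_false, Bool.false_eq_true, htails, hheads]
      rw [ih m hm, hK, List.range_succ_eq_map, List.map_cons, List.map_map]
      simp [Function.comp_def]

lemma slices_eq (cs : List Char) (n : Int) :
    (PySem.List.pyRange 0 n 1).map (fun i => PySem.List.slice cs (some i) none)
      = (List.range n.toNat).map (fun i => cs.drop i) := by
  rw [PySem.List.pyRange_one]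
  simp only [List.map_map, Int.sub_zero]
  apply List.map_congr_left
  intro k _
  simp only [Function.comp_apply, zero_add]
  rw [PySem.List.slice_from_natCast]

-- ===== VERDICT (by name: the statement is the Claim_ definition above) =====
theorem n_gram_list_spec : Claim_equal_n_gram_list := by
  intro text n _
  unfold Spec_n_gram_list n_gram_list n_gram_list_alt
  by_cases hn : n ≤ 0
  · have : PySem.List.pyRange 0 n 1 = [] := PySem.List.pyRange_one_eq_nil (by omega)
    simp [this, pyZipStar, hn]
  · have hn1 : 1 ≤ n := by omega
    simp only [hn, if_false]
    rw [foldl_push, foldl_push, slices_eq text.toList n]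
    simp only [List.nil_append]
    have hm : 1 ≤ n.toNat := by omega
    obtain ⟨m', hm'⟩ : ∃ m', n.toNat = m' + 1 := ⟨n.toNat - 1, by omega⟩
    have hfirst : (List.range n.toNat).map (fun i => text.toList.drop i)
        = text.toList :: ((List.range m').map Nat.succ).map (fun i => text.toList.drop i) := by
      rw [hm', List.range_succ_eq_map]
      simp
    rw [show pyZipStar ((List.range n.toNat).map (fun i => text.toList.drop i))
        = pyZipStarGo text.toList.length ((List.range n.toNat).map (fun i => text.toList.drop i)) by
      rw [hfirst]; rfl]
    rw [zip_windows text.toList n.toNat hm]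
    simp [List.map_map]
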